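-- pv_equiv track=rewrite | github.com/Shrutika-TechSavvy/Information_-_Cybersecurity-ICS- | classical-ciphers/hill/hill_manual.py | build_plain_matrix
-- ===== SOURCE A (Python) =====
-- def text_to_numbers(text):
--     return [ord(ch) - 65 for ch in text]
--
-- def build_plain_matrix(text, n):
--     text = text.upper().replace(" ", "")
--
--     nums = text_to_numbers(text)
--
--     # Padding
--     while len(nums) % n != 0:
--         nums.append(23)
--
--     matrix = []
--
--     for i in range(0, len(nums), n):
--         matrix.append(nums[i:i+n])
--
--     return matrix
-- ===== SOURCE B (Python) =====
-- def build_plain_matrix(text, n):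
--     text = text.upper().replace(" ", "")
--     matrix = []
--     row = []
--     for ch in text:
--         row.append(ord(ch) - 65)
--         if len(row) == n:
--             matrix.append(row)
--             row = []
--     if row:
--         matrix.append(row + [23] * (n - len(row)))
--     return matrix
-- ===== Notes on version B (the rewrite author's own statement) =====
-- stated objective: simpler
-- what changed: B builds the matrix in one streaming pass over the normalized text (current row accumulator, padded once at the end), instead of A's flat numeric list, append-one-at-a-time padding loop and slicing loop; Pre_ restricts to the natural domain n >= 1: n = 0 makes A raise ZeroDivisionError and for n < 0 A's empty-matrix return is an artefact of range() with a negative step.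
-- outside the precondition, e.g. on build_plain_matrix('ABC', -2): A returns [], B returns [[0, 1, 2]]; on build_plain_matrix('AB', 0): A raises ZeroDivisionError, B returns [[0, 1]]
import Mathlib
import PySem

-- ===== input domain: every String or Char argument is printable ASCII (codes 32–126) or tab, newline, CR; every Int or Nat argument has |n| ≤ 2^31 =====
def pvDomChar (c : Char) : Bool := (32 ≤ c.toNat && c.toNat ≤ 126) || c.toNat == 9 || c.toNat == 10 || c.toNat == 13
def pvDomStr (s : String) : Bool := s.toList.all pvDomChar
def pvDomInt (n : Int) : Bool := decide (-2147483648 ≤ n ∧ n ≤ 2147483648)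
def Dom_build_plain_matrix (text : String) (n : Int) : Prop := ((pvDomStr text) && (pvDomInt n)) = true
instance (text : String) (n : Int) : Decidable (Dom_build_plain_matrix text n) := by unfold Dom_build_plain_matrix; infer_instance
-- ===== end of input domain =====

-- B builds the matrix in one streaming pass (row accumulator, padded once at the end)
-- instead of A's flat numeric list + one-at-a-time padding loop + slicing loop; same O(len(text)) cost.

-- ===== PORT A =====
def text_to_numbers (text : String) : List Int :=
  text.toList.map (fun ch => (ch.toNat : Int) - 65)

-- the 'while len(nums) % n != 0: nums.append(23)' loop, with a fuel guard for totality
def pvPadA (n : Int) : Nat → List Int → List Int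
  | 0, nums => nums
  | fuel + 1, nums =>
      if PySem.Int.mod (nums.length : Int) n ≠ 0 then pvPadA n fuel (nums ++ [23]) else nums

def build_plain_matrix (text : String) (n : Int) : List (List Int) :=
  let t := PySem.Str.replace (PySem.Str.upper text) " " ""
  let nums0 := text_to_numbers t
  let nums := pvPadA n n.toNat nums0
  (PySem.List.pyRange 0 (nums.length : Int) n).foldl
    (fun matrix i => matrix ++ [PySem.List.slice nums (some i) (some (i + n))]) []

-- ===== PORT B =====
def build_plain_matrix_alt (text : String) (n : Int) : List (List Int) :=
  let t := PySem.Str.replace (PySem.Str.upper text) " " ""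
  let st := t.toList.foldl
    (fun (st : List (List Int) × List Int) ch =>
      let row := st.2 ++ [(ch.toNat : Int) - 65]
      if (row.length : Int) = n then (st.1 ++ [row], []) else (st.1, row))
    ([], [])
  if st.2 = [] then st.1
  else st.1 ++ [st.2 ++ List.replicate (n - (st.2.length : Int)).toNat 23]

-- ===== PRECONDITION & SPEC =====
-- Pre_ restricts to the natural domain n ≥ 1: for n = 0 A raises ZeroDivisionError, and for
-- n < 0 (a nonsensical block size) A's empty-matrix return is an artefact of range()'s negative step.
def Pre_build_plain_matrix (_text : String) (n : Int) : Prop := 1 ≤ n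
instance (text : String) (n : Int) : Decidable (Pre_build_plain_matrix text n) := by
  unfold Pre_build_plain_matrix; infer_instance

def pvWitness_build_plain_matrix : String × Int := ("HI A", 2)

def Spec_build_plain_matrix (text : String) (n : Int) (out : List (List Int)) : Prop :=
  out = build_plain_matrix_alt text n
instance (text : String) (n : Int) (out : List (List Int)) : Decidable (Spec_build_plain_matrix text n out) := by
  unfold Spec_build_plain_matrix; infer_instance

-- ===== CLAIM (what is proved, stated in full; the proofs are below) =====
def Claim_equal_build_plain_matrix : Prop := ∀ (text : String) (n : Int), Dom_build_plain_matrix text n → Pre_build_plain_matrix text n → Spec_build_plain_matrix text n (build_plain_matrix text n)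

-- ===== LEMMAS AND PROOFS =====

-- proof-side specification: pad to a multiple of N, then chunk into rows of N
def padC (N : Nat) (l : List Int) : List Int :=
  l ++ List.replicate ((N - l.length % N) % N) 23

def chunkE (N : Nat) (m : List Int) : List (List Int) :=
  if h : m = [] ∨ N = 0 then [] else m.take N :: chunkE N (m.drop N)
termination_by m.length
decreasing_by
  rw [not_or] at h
  have : 0 < m.length := List.length_pos_of_ne_nil h.1
  simp only [List.length_drop]; omega

theorem pymod_natCast (a N : Nat) : PySem.Int.mod (a : Int) (N : Int) = ((a % N : Nat) : Int) := by
  simp only [PySem.Int.mod]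
  rw [Int.fmod_eq_emod, if_pos (Or.inl (Int.natCast_nonneg N)), add_zero, Int.natCast_mod]

theorem chunkE_nil (N : Nat) : chunkE N [] = [] := by
  rw [chunkE]; simp

theorem chunkE_cons (N : Nat) (hN : 1 ≤ N) (a z : List Int) (ha : a.length = N) :
    chunkE N (a ++ z) = a :: chunkE N z := by
  rw [chunkE]
  have hne : a ++ z ≠ [] := by
    intro h; have := congrArg List.length h; simp [ha] at this; omega
  rw [dif_neg (by rw [not_or]; exact ⟨hne, by omega⟩)]
  have ht : (a ++ z).take N = a := by rw [← ha, List.take_left]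
  have hd : (a ++ z).drop N = z := by rw [← ha, List.drop_left]
  rw [ht, hd]

theorem padC_mod_zero (N : Nat) (hN : 1 ≤ N) (l : List Int) :
    ∃ c, (padC N l).length = c * N := by
  unfold padC
  simp only [List.length_append, List.length_replicate]
  have hq : N * (l.length / N) + l.length % N = l.length := Nat.div_add_mod l.length N
  have hq' : (l.length / N) * N + l.length % N = l.length := by rw [Nat.mul_comm] at hq; exact hq
  have hr : l.length % N < N := Nat.mod_lt _ (by omega)
  by_cases h0 : l.length % N = 0
  · refine ⟨l.length / N, ?_⟩
    rw [h0, Nat.sub_zero, Nat.mod_self, Nat.add_zero]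
    omega
  · refine ⟨l.length / N + 1, ?_⟩
    rw [Nat.mod_eq_of_lt (by omega : N - l.length % N < N), Nat.add_mul, Nat.one_mul]
    omega

theorem padC_append (N : Nat) (a b : List Int) (ha : N ∣ a.length) :
    padC N (a ++ b) = a ++ padC N b := by
  unfold padC
  obtain ⟨t, ht⟩ := ha
  have : (a ++ b).length % N = b.length % N := by
    rw [List.length_append, ht, Nat.mul_add_mod]
  rw [this, List.append_assoc]

theorem padA_eq_padC (N : Nat) (hN : 1 ≤ N) :
    ∀ (fuel : Nat) (l : List Int), (N - l.length % N) % N ≤ fuel →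
      pvPadA (N : Int) fuel l = padC N l := by
  intro fuel
  induction fuel with
  | zero =>
      intro l hf
      have hr : l.length % N < N := Nat.mod_lt _ (by omega)
      have h0 : l.length % N = 0 := by
        by_contra h
        have : (N - l.length % N) % N = N - l.length % N := Nat.mod_eq_of_lt (by omega)
        omega
      simp [pvPadA, padC, h0]
  | succ f ih =>
      intro l hf
      have hr : l.length % N < N := Nat.mod_lt _ (by omega)
      have hq : N * (l.length / N) + l.length % N = l.length := Nat.div_add_mod l.length N
      by_cases h0 : l.length % N = 0
      · have hmod : ¬ (PySem.Int.mod (l.length : Int) (N : Int) ≠ 0) := by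
          rw [pymod_natCast, h0]; simp
        simp [pvPadA, padC, h0]
      · have hmod : PySem.Int.mod (l.length : Int) (N : Int) ≠ 0 := by
          rw [pymod_natCast]
          exact_mod_cast fun h => h0 (by exact_mod_cast h)
        rw [pvPadA, if_pos hmod]
        have hlen : (l ++ [23]).length = l.length + 1 := by
          rw [List.length_append, List.length_singleton]
        have hk : (N - l.length % N) % N = N - l.length % N := Nat.mod_eq_of_lt (by omega)
        have hm1 : (l.length + 1) % N = (l.length % N + 1) % N := by
          conv_lhs => rw [← hq]
          rw [Nat.add_assoc, Nat.mul_add_mod]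
        have hk1 : (N - (l.length + 1) % N) % N = N - l.length % N - 1 := by
          by_cases he : l.length % N = N - 1
          · have h2 : (l.length + 1) % N = 0 := by
              rw [hm1, he]
              have : N - 1 + 1 = N := by omega
              rw [this, Nat.mod_self]
            rw [h2, Nat.sub_zero, Nat.mod_self]
            omega
          · have h2 : (l.length + 1) % N = l.length % N + 1 := by
              rw [hm1]; exact Nat.mod_eq_of_lt (by omega)
            rw [h2, Nat.mod_eq_of_lt (by omega)]
            omega
        rw [ih (l ++ [23]) (by rw [hlen, hk1]; omega)]
        unfold padC
        rw [hlen, hk1, hk, List.append_assoc]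
        congr 1
        have hrepl : N - l.length % N = (N - l.length % N - 1) + 1 := by omega
        rw [hrepl, List.replicate_succ]
        simp

theorem foldl_comp {α β σ : Type} (g : σ → β → σ) (f : α → β) (l : List α) (init : σ) :
    l.foldl (fun s a => g s (f a)) init = (l.map f).foldl g init := by
  induction l generalizing init with
  | nil => simp
  | cons x xs ih => simp [List.foldl_cons, ih]

theorem foldl_append_singleton {α : Type} (g : α → List Int) :
    ∀ (l : List α) (acc : List (List Int)),
      l.foldl (fun acc x => acc ++ [g x]) acc = acc ++ l.map g := by
  intro l
  induction l with
  | nil => intro acc; simp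
  | cons x xs ih => intro acc; simp [List.foldl_cons, ih, List.append_assoc]

theorem mapchunk (N : Nat) (hN : 1 ≤ N) :
    ∀ (c : Nat) (m : List Int), m.length = c * N →
      (List.range c).map (fun k => (m.drop (N * k)).take N) = chunkE N m := by
  intro c
  induction c with
  | zero =>
      intro m hm
      have : m = [] := List.eq_nil_of_length_eq_zero (by omega)
      simp [this, chunkE_nil]
  | succ c ih =>
      intro m hm
      have hlen : N ≤ m.length := by
        rw [hm]; calc N = 1 * N := (Nat.one_mul N).symm
                      _ ≤ (c + 1) * N := Nat.mul_le_mul_right _ (by omega)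
      have hsplit : m = m.take N ++ m.drop N := (List.take_append_drop N m).symm
      have htl : (m.take N).length = N := by rw [List.length_take]; omega
      rw [List.range_succ_eq_map, List.map_cons, List.map_map]
      have h0 : (m.drop (N * 0)).take N = m.take N := by simp
      rw [h0]
      have hrest : ∀ k, ((fun k => (m.drop (N * k)).take N) ∘ Nat.succ) k
          = ((m.drop N).drop (N * k)).take N := by
        intro k
        simp only [Function.comp]
        rw [List.drop_drop]
        congr 2
        rw [Nat.succ_eq_add_one]
        ring
      rw [List.map_congr_left (fun k _ => hrest k)]
      have hdl : (m.drop N).length = c * N := by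
        rw [List.length_drop, hm, Nat.add_mul, Nat.one_mul]; omega
      rw [ih (m.drop N) hdl]
      conv_rhs => rw [hsplit]
      rw [chunkE_cons N hN _ _ htl]

theorem bfold (N : Nat) (hN : 1 ≤ N) :
    ∀ (xs : List Int) (M : List (List Int)) (r : List Int), r.length < N →
      (let st := xs.foldl
          (fun (st : List (List Int) × List Int) x =>
            let row := st.2 ++ [x]
            if (row.length : Int) = (N : Int) then (st.1 ++ [row], []) else (st.1, row))
          (M, r)
       if st.2 = [] then st.1
       else st.1 ++ [st.2 ++ List.replicate ((N : Int) - (st.2.length : Int)).toNat 23])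
      = M ++ chunkE N (padC N (r ++ xs)) := by
  intro xs
  induction xs with
  | nil =>
      intro M r hr
      simp only [List.foldl_nil, List.append_nil]
      by_cases h0 : r = []
      · subst h0
        simp [padC, chunkE_nil, Nat.mod_self]
      · have hrl : 1 ≤ r.length := List.length_pos_of_ne_nil h0
        rw [if_neg h0]
        have hmod : r.length % N = r.length := Nat.mod_eq_of_lt hr
        have hk : (N - r.length % N) % N = N - r.length := by
          rw [hmod]; exact Nat.mod_eq_of_lt (by omega)
        have hpc : padC N r = r ++ List.replicate (N - r.length) 23 := by
          unfold padC; rw [hk]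
        have htn : ((N : Int) - (r.length : Int)).toNat = N - r.length := by omega
        have hlenfull : (r ++ List.replicate (N - r.length) 23).length = N := by
          rw [List.length_append, List.length_replicate]; omega
        have hch : chunkE N (padC N r) = [r ++ List.replicate (N - r.length) 23] := by
          rw [hpc]
          have := chunkE_cons N hN (r ++ List.replicate (N - r.length) 23) [] hlenfull
          simpa [chunkE_nil] using this
        rw [hch, htn]
  | cons x rest ih =>
      intro M r hr
      simp only [List.foldl_cons]
      have hassoc : r ++ x :: rest = (r ++ [x]) ++ rest := by simp
      have hlen1 : (r ++ [x]).length = r.length + 1 := by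
        rw [List.length_append, List.length_singleton]
      by_cases hfull : ((r ++ [x]).length : Int) = (N : Int)
      · rw [if_pos hfull]
        have hlen : (r ++ [x]).length = N := by exact_mod_cast hfull
        have hIH := ih (M ++ [r ++ [x]]) [] (by simp; omega)
        simp only [List.nil_append] at hIH
        rw [hIH, hassoc]
        rw [padC_append N (r ++ [x]) rest ⟨1, by omega⟩]
        rw [chunkE_cons N hN _ _ hlen]
        simp
      · rw [if_neg hfull]
        have hlenne : (r ++ [x]).length ≠ N := fun h => hfull (by exact_mod_cast h)
        have hlt : (r ++ [x]).length < N := by rw [hlen1]; omega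
        have hIH := ih M (r ++ [x]) hlt
        rw [hIH, hassoc]

theorem pyRange_mul (N : Nat) (hN : 1 ≤ N) (c : Nat) :
    PySem.List.pyRange 0 ((c * N : Nat) : Int) (N : Int)
      = (List.range c).map (fun k => ((N * k : Nat) : Int)) := by
  rw [PySem.List.pyRange_of_pos 0 _ (by exact_mod_cast hN)]
  by_cases hc : c = 0
  · subst hc; simp
  · have hpos : (0 : Int) < ((c * N : Nat) : Int) := by
      have : 1 ≤ c * N := Nat.one_le_iff_ne_zero.mpr (by positivity)
      exact_mod_cast this
    rw [if_pos hpos]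
    have harith : ((c * N : Nat) : Int) - 0 + (N : Int) - 1 = ((c * N + N - 1 : Nat) : Int) := by
      push_cast [Nat.cast_sub (by omega : 1 ≤ c * N + N)]; ring
    rw [harith, ← Int.natCast_div, Int.toNat_natCast]
    have hdiv : (c * N + N - 1) / N = c := by
      have h1 : c * N + N - 1 = N * c + (N - 1) := by rw [Nat.mul_comm]; omega
      rw [h1, Nat.mul_add_div (by omega : 0 < N), Nat.div_eq_of_lt (by omega : N - 1 < N), Nat.add_zero]
    rw [hdiv]
    apply List.map_congr_left
    intro k _
    push_cast
    ring

-- ===== VERDICT (by name: the statement is the Claim_ definition above) =====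
set_option maxHeartbeats 1000000 in
theorem build_plain_matrix_spec : Claim_equal_build_plain_matrix := by
  intro text n _hdom hpre
  have hpre' : 1 ≤ n := hpre
  clear hpre
  have hn : ((n.toNat : Nat) : Int) = n := Int.toNat_of_nonneg (by omega : (0:Int) ≤ n)
  have hN1 : 1 ≤ n.toNat := by omega
  generalize hNdef : n.toNat = N at hn hN1
  subst hn
  set f : Char → Int := fun ch => (ch.toNat : Int) - 65 with hf
  set cs := (PySem.Str.replace (PySem.Str.upper text) " " "").toList with hcs
  set nums := cs.map f with hnums
  have hA : build_plain_matrix text (N : Int) = chunkE N (padC N nums) := by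
    simp only [build_plain_matrix, text_to_numbers, Int.toNat_natCast, ← hf, ← hcs, ← hnums]
    rw [padA_eq_padC N hN1 N nums
      (le_of_lt (Nat.mod_lt _ (by omega : 0 < N)))]
    obtain ⟨c, hc⟩ := padC_mod_zero N hN1 nums
    set P := padC N nums with hP
    have hcast : ((P.length : Nat) : Int) = ((c * N : Nat) : Int) := by exact_mod_cast hc
    rw [hcast, pyRange_mul N hN1 c, List.foldl_map]
    have hslice : ∀ (mx : List (List Int)) (k : Nat),
        mx ++ [PySem.List.slice P (some ((N * k : Nat) : Int)) (some (((N * k : Nat) : Int) + (N : Int)))]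
          = mx ++ [(P.drop (N * k)).take N] := by
      intro mx k
      rw [PySem.List.slice_natCast_add]
    simp only [hslice]
    rw [foldl_append_singleton (fun k => (P.drop (N * k)).take N) (List.range c) [],
      List.nil_append, mapchunk N hN1 c P hc]
  have hB : build_plain_matrix_alt text (N : Int) = chunkE N (padC N nums) := by
    simp only [build_plain_matrix_alt, ← hcs]
    have hstep : (fun (st : List (List Int) × List Int) ch =>
        let row := st.2 ++ [(ch.toNat : Int) - 65]
        if (row.length : Int) = (N : Int) then (st.1 ++ [row], ([] : List Int)) else (st.1, row))
        = fun st ch =>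
          (fun (st : List (List Int) × List Int) x =>
            let row := st.2 ++ [x]
            if (row.length : Int) = (N : Int) then (st.1 ++ [row], ([] : List Int)) else (st.1, row))
          st (f ch) := rfl
    rw [hstep, foldl_comp (fun (st : List (List Int) × List Int) x =>
        let row := st.2 ++ [x]
        if (row.length : Int) = (N : Int) then (st.1 ++ [row], ([] : List Int)) else (st.1, row))
      f cs ([], []), ← hnums]
    have hBf := bfold N hN1 nums [] [] (by simp; omega)
    simp only [List.nil_append] at hBf
    exact hBf
  exact hA.trans hB.symm
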